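-- pv_equiv track=rewrite | github.com/DaniloMandusic/Puzzle-Game-AI | heuristics.py | get_evaluation
-- ===== SOURCE A (Python) =====
-- import math
--
-- def get_evaluation(state):
--     def manhattan_distance_sum(array1, array2):
--         n = len(array1)
--
--         total_distance = 0
--
--         for i in range(n):
--             for j in range(n):
--                 element1 = array1[i][j]
--                 element2 = array2[i][j]
--
--                 distance = abs(i - element1 // n) + abs(j - element1 % n)
--                 distance += abs(i - element2 // n) + abs(j - element2 % n)
--
--                 total_distance += distance
--
--         return total_distance
--
--     def list_to_matrix(lst):
--         n = int(math.sqrt(len(lst)))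
--         matrix = [lst[i:i + n] for i in range(0, len(lst), n)]
--         return matrix
--
--     def final_matrix(lst):
--         n = int(math.sqrt(len(lst)))
--         index_matrix = [list(range(i, i + n)) for i in range(0, len(lst), n)]
--         return index_matrix
--
--     state = list(state)
--
--     matrixState = list_to_matrix(state)
--     finalState = final_matrix(state)
--
--     return manhattan_distance_sum(matrixState, finalState)
-- ===== SOURCE B (Python) =====
-- import math
--
--
-- def get_evaluation(state):
--     tiles = list(state)
--     n = math.isqrt(len(tiles))
--     if n * n != len(tiles):
--         raise ValueError("state length is not a perfect square")
--     total = 0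
--     i = j = 0
--     for v in tiles:
--         r, c = divmod(v, n)
--         total += abs(i - r) + abs(j - c)
--         j += 1
--         if j == n:
--             i, j = i + 1, 0
--     return total
-- ===== Notes on version B (the rewrite author's own statement) =====
-- stated objective: simpler
-- what changed: B validates that the length is a perfect square, then makes one streaming pass over the flat list carrying the current (row, col) coordinates with increment-and-wrap, instead of A's two reshaped matrices scanned by nested index loops with an always-zero identity-matrix term.
-- outside the precondition, e.g. on get_evaluation([]): A raises ValueError, B returns 0; on get_evaluation([1, 0, 2]): A raises IndexError, B raises ValueError
import Mathlib
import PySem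

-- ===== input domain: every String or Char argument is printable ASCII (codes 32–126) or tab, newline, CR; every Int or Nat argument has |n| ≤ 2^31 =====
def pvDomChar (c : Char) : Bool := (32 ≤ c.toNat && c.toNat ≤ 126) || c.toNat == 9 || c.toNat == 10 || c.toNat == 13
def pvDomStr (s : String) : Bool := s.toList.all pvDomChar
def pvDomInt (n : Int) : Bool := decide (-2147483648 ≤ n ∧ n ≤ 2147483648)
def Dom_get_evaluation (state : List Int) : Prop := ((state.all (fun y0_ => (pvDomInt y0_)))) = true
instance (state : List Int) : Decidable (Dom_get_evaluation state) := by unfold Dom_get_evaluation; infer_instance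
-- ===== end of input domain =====

-- B replaces A's two reshaped matrices and nested index loops (with an always-zero identity term)
-- by one validated streaming pass carrying (row, col) coordinates (return value only; no argument
-- is observably mutated).

-- ===== PORT A =====
-- A's accesses array1[i][j] / array2[i][j] raise IndexError when out of range in Python; the
-- pyGetD defaults here are never reached on Pre_ (all accesses in range there), and the inputs
-- where Python raises are excluded by Pre_.
def pvManhattanSum (array1 array2 : List (List Int)) : Int :=
  let n : Int := array1.length
  (PySem.List.pyRange 0 n 1).foldl (fun tot i =>
    (PySem.List.pyRange 0 n 1).foldl (fun tot j =>
      let element1 := PySem.List.pyGetD (PySem.List.pyGetD array1 i []) j 0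
      let element2 := PySem.List.pyGetD (PySem.List.pyGetD array2 i []) j 0
      let distance := |i - PySem.Int.floordiv element1 n| + |j - PySem.Int.mod element1 n|
      let distance := distance + (|i - PySem.Int.floordiv element2 n| + |j - PySem.Int.mod element2 n|)
      tot + distance) tot) 0

-- int(math.sqrt(len(lst))) is Nat.sqrt of the length on every input Pre_ admits (exact there)
def pvListToMatrix (lst : List Int) : List (List Int) :=
  let n : Int := (Nat.sqrt lst.length : Nat)
  (PySem.List.pyRange 0 lst.length n).map (fun i => PySem.List.slice lst (some i) (some (i + n)))

def pvFinalMatrix (lst : List Int) : List (List Int) :=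
  let n : Int := (Nat.sqrt lst.length : Nat)
  (PySem.List.pyRange 0 lst.length n).map (fun i => PySem.List.pyRange i (i + n) 1)

def get_evaluation (state : List Int) : Int :=
  pvManhattanSum (pvListToMatrix state) (pvFinalMatrix state)

-- ===== PORT B =====
-- one step of B's loop body: add the tile's Manhattan distance, then advance (i, j) with wrap
def pvStepB (n : Int) (acc : Int × Int × Int) (v : Int) : Int × Int × Int :=
  let total := acc.1 + (|acc.2.1 - PySem.Int.floordiv v n| + |acc.2.2 - PySem.Int.mod v n|)
  if acc.2.2 + 1 == n then (total, acc.2.1 + 1, 0) else (total, acc.2.1, acc.2.2 + 1)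

-- math.isqrt = Nat.sqrt exactly; B raises ValueError on the guard, so those inputs are outside
-- Pre_ and the 0 of the raising branch is never reached on Pre_
def get_evaluation_alt (state : List Int) : Int :=
  let n : Int := (Nat.sqrt state.length : Nat)
  if n * n ≠ (state.length : Int) then 0
  else (state.foldl (pvStepB n) (0, 0, 0)).1

-- ===== PRECONDITION & SPEC =====
-- Pre_ admits exactly the inputs the Python A returns on: a nonempty list of perfect-square
-- length (otherwise A raises: ValueError on [], IndexError on any non-square length; there B
-- raises ValueError on non-square lengths and returns 0 on []).
def Pre_get_evaluation (state : List Int) : Prop :=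
  state ≠ [] ∧ ∃ k ≤ state.length, k * k = state.length
instance (state : List Int) : Decidable (Pre_get_evaluation state) := by
  unfold Pre_get_evaluation; infer_instance

def pvWitness_get_evaluation : List Int := [3, 1, 0, 2]

def Spec_get_evaluation (state : List Int) (out : Int) : Prop := out = get_evaluation_alt state
instance (state : List Int) (out : Int) : Decidable (Spec_get_evaluation state out) := by
  unfold Spec_get_evaluation; infer_instance

-- ===== CLAIM (what is proved, stated in full; the proofs are below) =====
def Claim_equal_get_evaluation : Prop := ∀ (state : List Int), Dom_get_evaluation state →
  Pre_get_evaluation state → Spec_get_evaluation state (get_evaluation state)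

-- ===== LEMMAS AND PROOFS =====

-- the Manhattan-distance contribution of grid cell (i, j) (proof-only abbreviation)
def pvTerm (state : List Int) (k i j : Nat) : Int :=
  |(i : Int) - PySem.Int.floordiv (state.getD (k * i + j) 0) (k : Nat)| +
  |(j : Int) - PySem.Int.mod (state.getD (k * i + j) 0) (k : Nat)|

-- the contribution of flat position p holding value v (proof-only abbreviation)
def pvD (k : Nat) (p : Nat) (v : Int) : Int :=
  |((p / k : Nat) : Int) - PySem.Int.floordiv v (k : Nat)| +
  |((p % k : Nat) : Int) - PySem.Int.mod v (k : Nat)|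

lemma pvGetD_map_range {α : Type} (f : Nat → α) (n i : Nat) (h : i < n) (d : α) :
    ((List.range n).map f).getD i d = f i := by
  rw [List.getD_eq_getElem?_getD, List.getElem?_map, List.getElem?_range h]; rfl

lemma pvSqrt (state : List Int) (k : Nat) (hk : k * k = state.length) :
    Nat.sqrt state.length = k := by
  rw [← hk, ← pow_two]; exact Nat.sqrt_eq' k

lemma pvRowRange (k : Nat) (hpos : 0 < k) :
    PySem.List.pyRange 0 ((k * k : Nat) : Int) ((k : Nat) : Int)
      = (List.range k).map (fun t => ((0 : Int) + (k : Int) * (t : Nat))) := by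
  rw [PySem.List.pyRange_of_pos 0 ((k * k : Nat) : Int) (by exact_mod_cast hpos)]
  have hb : (0 : Int) < ((k * k : Nat) : Int) := by exact_mod_cast Nat.mul_pos hpos hpos
  rw [if_pos hb]
  have hnum : ((k * k : Nat) : Int) - 0 + (k : Nat) - 1 = ((k * k + k - 1 : Nat) : Int) := by omega
  have hdiv : (k * k + k - 1) / k = k := by
    have h1 : k * k + k - 1 = (k - 1) + k * k := by omega
    rw [h1, Nat.add_mul_div_left _ _ hpos, Nat.div_eq_of_lt (by omega), Nat.zero_add]
  rw [hnum, ← Int.natCast_div, hdiv, Int.toNat_natCast]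

lemma pvA_eq (state : List Int) (k : Nat) (hk : k * k = state.length) (hpos : 0 < k) :
    get_evaluation state
      = ((List.range k).map (fun i =>
          ((List.range k).map (fun j => pvTerm state k i j)).sum)).sum := by
  have hs : Nat.sqrt state.length = k := pvSqrt state k hk
  simp only [get_evaluation, pvListToMatrix, pvFinalMatrix, pvManhattanSum]
  rw [hs, ← hk]
  rw [pvRowRange k hpos]
  simp only [List.map_map, Function.comp_def, zero_add, ← Nat.cast_mul,
    PySem.List.slice_natCast_add, List.length_map, List.length_range]
  rw [PySem.List.pyRange_one]
  simp only [sub_zero, Int.toNat_natCast]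
  simp only [PySem.List.foldl_add, zero_add, List.map_map, Function.comp_def]
  refine congrArg List.sum (List.map_congr_left ?_)
  intro i hi
  rw [List.mem_range] at hi
  refine congrArg List.sum (List.map_congr_left ?_)
  intro j hj
  rw [List.mem_range] at hj
  -- matrix rows
  simp only [PySem.List.pyGetD_natCast]
  rw [pvGetD_map_range _ k i hi, pvGetD_map_range _ k i hi]
  -- element1 = state.getD (k*i + j) 0
  have he1 : (List.take k (List.drop (k * i) state)).getD j 0 = state.getD (k * i + j) 0 := by
    rw [List.getD_eq_getElem?_getD, List.getElem?_take, if_pos hj, List.getElem?_drop,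
      ← List.getD_eq_getElem?_getD]
  rw [he1]
  -- element2 = k*i + j
  have hlen : j < (PySem.List.pyRange ((k * i : Nat) : Int) (((k * i : Nat) : Int) + (k : Nat)) 1).length := by
    rw [PySem.List.length_pyRange_one]; omega
  have he2 : (PySem.List.pyRange ((k * i : Nat) : Int) (((k * i : Nat) : Int) + (k : Nat)) 1).getD j 0
      = ((k * i + j : Nat) : Int) := by
    rw [List.getD_eq_getElem?_getD, List.getElem?_eq_getElem hlen, Option.getD_some,
      PySem.List.getElem_pyRange_one]
    push_cast; ring
  rw [he2]
  -- the identity term vanishes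
  have hd2 : PySem.Int.floordiv ((k * i + j : Nat) : Int) ((k : Nat) : Int) = (i : Int) := by
    rw [PySem.Int.floordiv_natCast, Nat.mul_add_div hpos, Nat.div_eq_of_lt hj, add_zero]
  have hm2 : PySem.Int.mod ((k * i + j : Nat) : Int) ((k : Nat) : Int) = (j : Int) := by
    rw [PySem.Int.mod_natCast, Nat.mul_add_mod, Nat.mod_eq_of_lt hj]
  rw [hd2, hm2]
  simp only [sub_self, abs_zero, add_zero, pvTerm]

-- loop invariant of B's pass: starting at flat position p with coordinates (p / k, p % k),
-- folding over l adds the contribution of each value at its running position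
lemma pvFoldInv (k : Nat) (hpos : 0 < k) (l : List Int) (t : Int) (p : Nat) :
    (l.foldl (pvStepB ((k : Nat) : Int)) (t, ((p / k : Nat) : Int), ((p % k : Nat) : Int))).1
      = t + ((List.range l.length).map (fun m => pvD k (p + m) (l.getD m 0))).sum := by
  induction l generalizing t p with
  | nil => simp
  | cons v l ih =>
    rw [List.foldl_cons]
    have hstep : pvStepB ((k : Nat) : Int) (t, ((p / k : Nat) : Int), ((p % k : Nat) : Int)) v
        = (t + pvD k p v, (((p + 1) / k : Nat) : Int), (((p + 1) % k : Nat) : Int)) := by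
      have hdm := Nat.div_add_mod p k
      have hlt : p % k < k := Nat.mod_lt p hpos
      simp only [pvStepB, pvD]
      by_cases h : p % k + 1 = k
      · have hx : k * (p / k + 1) = k * (p / k) + k := by ring
        have hp : p + 1 = k * (p / k + 1) := by omega
        have hdiv : (p + 1) / k = p / k + 1 := by
          rw [hp, Nat.mul_div_cancel_left _ hpos]
        have hmod : (p + 1) % k = 0 := by rw [hp]; exact Nat.mul_mod_right k _
        rw [if_pos (by simp only [beq_iff_eq]; exact_mod_cast h), hdiv, hmod]
        push_cast; ring_nf
      · have hlt' : p % k + 1 < k := by omega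
        have hp : p + 1 = k * (p / k) + (p % k + 1) := by omega
        have hdiv : (p + 1) / k = p / k := by
          rw [hp, Nat.mul_add_div hpos, Nat.div_eq_of_lt hlt', add_zero]
        have hmod : (p + 1) % k = p % k + 1 := by
          rw [hp, Nat.mul_add_mod, Nat.mod_eq_of_lt hlt']
        rw [if_neg (by simp only [beq_iff_eq]; intro hc; exact h (by exact_mod_cast hc)),
          hdiv, hmod]
        push_cast; ring_nf
    rw [hstep, ih]
    rw [List.length_cons, List.range_succ_eq_map]
    simp only [List.map_cons, List.map_map, Function.comp_def, List.sum_cons, List.getD_cons_zero,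
      List.getD_cons_succ, add_zero]
    have hg : (fun m => pvD k (p + (m + 1)) (l.getD m 0)) = (fun m => pvD k (p + 1 + m) (l.getD m 0)) := by
      funext m; congr 1; omega
    rw [hg]; ring

lemma pvB_eq (state : List Int) (k : Nat) (hk : k * k = state.length) (hpos : 0 < k) :
    get_evaluation_alt state
      = ((List.range (k * k)).map (fun idx => pvTerm state k (idx / k) (idx % k))).sum := by
  have hs : Nat.sqrt state.length = k := pvSqrt state k hk
  simp only [get_evaluation_alt]
  rw [hs]
  rw [if_neg (by omega)]
  have hinv := pvFoldInv k hpos state 0 0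
  rw [Nat.zero_div, Nat.zero_mod, Nat.cast_zero] at hinv
  rw [hinv, zero_add, ← hk]
  refine congrArg List.sum (List.map_congr_left ?_)
  intro m hm
  rw [List.mem_range] at hm
  simp only [Nat.zero_add, pvD, pvTerm]
  have hsplit : k * (m / k) + m % k = m := Nat.div_add_mod m k
  rw [hsplit]

lemma pvSum_reindex (k m : Nat) (f : Nat → Int) :
    ((List.range (k * m)).map f).sum
      = ((List.range m).map (fun i => ((List.range k).map (fun j => f (k * i + j))).sum)).sum := by
  induction m with
  | zero => simp
  | succ m ih =>
    rw [Nat.mul_succ, List.range_add, List.range_succ]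
    simp only [List.map_append, List.sum_append, List.map_map, Function.comp_def, ih,
      List.map_cons, List.map_nil, List.sum_cons, List.sum_nil, add_zero]

lemma pvCore (state : List Int) (k : Nat) (hk : k * k = state.length) (hpos : 0 < k) :
    get_evaluation state = get_evaluation_alt state := by
  rw [pvA_eq state k hk hpos, pvB_eq state k hk hpos, pvSum_reindex k k]
  refine congrArg List.sum (List.map_congr_left ?_)
  intro i _
  refine congrArg List.sum (List.map_congr_left ?_)
  intro j hj
  rw [List.mem_range] at hj
  rw [Nat.mul_add_div hpos, Nat.div_eq_of_lt hj, add_zero, Nat.mul_add_mod, Nat.mod_eq_of_lt hj]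

-- ===== VERDICT (by name: the statement is the Claim_ definition above) =====
theorem get_evaluation_spec : Claim_equal_get_evaluation := by
  intro state _ hpre
  obtain ⟨hne, k, _, hk⟩ := hpre
  have hpos : 0 < k := by
    rcases Nat.eq_zero_or_pos k with h | h
    · subst h
      have h0 : state.length = 0 := by omega
      exact absurd (List.length_eq_zero_iff.mp h0) hne
    · exact h
  show get_evaluation state = get_evaluation_alt state
  exact pvCore state k hk hpos
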